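-- pv_equiv track=rewrite | github.com/s-zaizen/makina | ml/scripts/converters/cvefixes.py | _cluster
-- ===== SOURCE A (Python) =====
-- def _cluster(nums: list[int], gap: int) -> list[tuple[int, int]]:
--     """Cluster sorted ints into [start, end] spans where consecutive
--     members are at most `gap` apart."""
--     if not nums:
--         return []
--     s = sorted(set(nums))
--     out: list[tuple[int, int]] = []
--     start = prev = s[0]
--     for n in s[1:]:
--         if n - prev > gap:
--             out.append((start, prev))
--             start = n
--         prev = n
--     out.append((start, prev))
--     return out
-- ===== SOURCE B (Python) =====
-- def _cluster(nums: list[int], gap: int) -> list[tuple[int, int]]: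
--     """Boundary-detection rewrite: over the sorted unique values, every gap
--     exceeding `gap` between adjacent values both ends a cluster (at its left
--     value) and starts one (at its right value); zipping the start list with
--     the end list yields the spans.  No running accumulator."""
--     s = sorted(set(nums))
--     starts = [b for a, b in zip(s, s[1:]) if b - a > gap]
--     ends = [a for a, b in zip(s, s[1:]) if b - a > gap]
--     return list(zip(s[:1] + starts, ends + s[-1:]))
-- ===== Notes on version B (the rewrite author's own statement) =====
-- stated objective: simpler
-- what changed: Replaced A's incremental scan carrying (out, start, prev) state by a stateless boundary-detection formulation: filter the adjacent pairs of the sorted unique list for gaps exceeding the threshold to get the cluster-start and cluster-end value lists, then zip them into spans.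
import Mathlib
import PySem

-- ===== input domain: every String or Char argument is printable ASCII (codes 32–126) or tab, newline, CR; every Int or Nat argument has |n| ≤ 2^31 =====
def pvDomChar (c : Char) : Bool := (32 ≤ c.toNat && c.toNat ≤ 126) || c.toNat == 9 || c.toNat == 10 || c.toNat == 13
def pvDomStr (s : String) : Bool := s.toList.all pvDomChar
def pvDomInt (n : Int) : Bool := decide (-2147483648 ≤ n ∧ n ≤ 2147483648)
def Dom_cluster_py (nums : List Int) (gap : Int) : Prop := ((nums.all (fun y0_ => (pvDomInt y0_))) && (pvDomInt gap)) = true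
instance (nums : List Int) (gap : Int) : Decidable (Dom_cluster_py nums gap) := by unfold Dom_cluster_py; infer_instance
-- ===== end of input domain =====

-- B replaces A's stateful (out, start, prev) scan by a stateless boundary detection:
-- filter adjacent pairs of the sorted unique list for large gaps, zip starts with ends (simpler).


-- ===== PORT A =====
def cluster_py (nums : List Int) (gap : Int) : List (Int × Int) :=
  if nums = [] then []
  else
    let s := PySem.List.sorted (PySem.Set.ofList nums) (fun x => x) false
    match s with
    | [] => []  -- unreachable: s is nonempty when nums ≠ []
    | x :: t =>
      let st := t.foldl (fun (st : List (Int × Int) × Int × Int) n =>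
        if n - st.2.2 > gap then (st.1 ++ [(st.2.1, st.2.2)], n, n)
        else (st.1, st.2.1, n)) ([], x, x)
      st.1 ++ [(st.2.1, st.2.2)]

-- ===== PORT B =====
def cluster_py_alt (nums : List Int) (gap : Int) : List (Int × Int) :=
  let s := PySem.List.sorted (PySem.Set.ofList nums) (fun x => x) false
  let pairs := s.zip (PySem.List.slice s (some 1) none)          -- zip(s, s[1:])
  let starts := pairs.filterMap (fun p => if p.2 - p.1 > gap then some p.2 else none)
  let ends := pairs.filterMap (fun p => if p.2 - p.1 > gap then some p.1 else none)
  (PySem.List.slice s none (some 1) ++ starts).zip (ends ++ PySem.List.slice s (some (-1)) none)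

-- ===== PRECONDITION & SPEC =====
def Spec_cluster_py (nums : List Int) (gap : Int) (out : List (Int × Int)) : Prop := out = cluster_py_alt nums gap
instance (nums : List Int) (gap : Int) (out : List (Int × Int)) : Decidable (Spec_cluster_py nums gap out) := by unfold Spec_cluster_py; infer_instance

-- ===== CLAIM (what is proved, stated in full; the proofs are below) =====
def Claim_equal_cluster_py : Prop := ∀ (nums : List Int) (gap : Int), Dom_cluster_py nums gap → Spec_cluster_py nums gap (cluster_py nums gap)

-- ===== LEMMAS AND PROOFS =====

-- A's loop body, written as a direct recursion (proof device bridging the two ports)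
def pvScanA (gap : Int) (start prev : Int) : List Int → List (Int × Int)
  | [] => [(start, prev)]
  | n :: t => if n - prev > gap then (start, prev) :: pvScanA gap n n t else pvScanA gap start n t

theorem foldA_eq_scanA (gap : Int) : ∀ (t : List Int) (out : List (Int × Int)) (start prev : Int),
    (t.foldl (fun (st : List (Int × Int) × Int × Int) n =>
        if n - st.2.2 > gap then (st.1 ++ [(st.2.1, st.2.2)], n, n)
        else (st.1, st.2.1, n)) (out, start, prev)).1 ++
      [((t.foldl (fun (st : List (Int × Int) × Int × Int) n =>
        if n - st.2.2 > gap then (st.1 ++ [(st.2.1, st.2.2)], n, n)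
        else (st.1, st.2.1, n)) (out, start, prev)).2.1,
        (t.foldl (fun (st : List (Int × Int) × Int × Int) n =>
        if n - st.2.2 > gap then (st.1 ++ [(st.2.1, st.2.2)], n, n)
        else (st.1, st.2.1, n)) (out, start, prev)).2.2)] =
      out ++ pvScanA gap start prev t := by
  intro t
  induction t with
  | nil => intro out start prev; simp [pvScanA]
  | cons n t ih =>
    intro out start prev
    simp only [List.foldl_cons, pvScanA]
    split_ifs with h
    · rw [ih]; simp
    · rw [ih]

-- B's zip of boundary lists, seen as A's scan
theorem zip_eq_scanA (gap : Int) : ∀ (t : List Int) (start prev : Int),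
    ((start :: ((prev :: t).zip t).filterMap
        (fun p => if p.2 - p.1 > gap then some p.2 else none)).zip
      (((prev :: t).zip t).filterMap
        (fun p => if p.2 - p.1 > gap then some p.1 else none) ++ [t.getLastD prev])) =
      pvScanA gap start prev t := by
  intro t
  induction t with
  | nil => intro start prev; simp [pvScanA]
  | cons n t ih =>
    intro start prev
    simp only [List.zip_cons_cons, List.filterMap_cons, pvScanA, List.getLastD_cons]
    split_ifs with h
    · simpa using ih n n
    · simpa using ih start n

-- drop (len-1) of a nonempty list is its last element, as a singleton
theorem drop_len_sub_one : ∀ (x : Int) (t : List Int),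
    (x :: t).drop ((x :: t).length - 1) = [t.getLastD x] := by
  intro x t
  induction t generalizing x with
  | nil => simp
  | cons y t ih =>
    simp only [List.length_cons, List.getLastD_cons]
    calc (x :: y :: t).drop (t.length + 1 + 1 - 1)
        = (y :: t).drop ((y :: t).length - 1) := by simp
      _ = [t.getLastD y] := ih y

-- ===== VERDICT (by name: the statement is the Claim_ definition above) =====
theorem cluster_py_spec : Claim_equal_cluster_py := by
  intro nums gap _
  unfold Spec_cluster_py cluster_py cluster_py_alt
  by_cases hn : nums = []
  · subst hn
    simp [PySem.Set.ofList, PySem.List.sorted, PySem.List.slice]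
  · rw [if_neg hn]
    cases hs : PySem.List.sorted (PySem.Set.ofList nums) (fun x => x) false with
    | nil => simp [PySem.List.slice]
    | cons x t =>
      have h1 : PySem.List.slice (x :: t) none (some 1) = [x] := by
        simp [PySem.List.slice]
      simp only [h1, PySem.List.slice_from_one, PySem.List.slice_from_neg_one,
        List.tail_cons, List.cons_append, List.nil_append]
      rw [drop_len_sub_one, zip_eq_scanA]
      exact foldA_eq_scanA gap t [] x x
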